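-- pv_equiv track=rewrite | github.com/ishakshay/morningtrade-v2 | backend/screeners/volume_analytics.py | _strike_step
-- ===== SOURCE A (Python) =====
-- def _strike_step(chain, atm):
--     """Infer strike step (50 for Nifty, 100 for BankNifty) from chain."""
--     if not chain or len(chain) < 2:
--         return 50
--     strikes = sorted(set(r.get('strike', 0) for r in chain if r.get('strike')))
--     if len(strikes) < 2:
--         return 50
--     diffs = [strikes[i+1] - strikes[i] for i in range(len(strikes)-1)]
--     return min(d for d in diffs if d > 0) if diffs else 50
-- ===== SOURCE B (Python) =====
-- def _strike_step(chain, atm):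
--     """Infer strike step (50 for Nifty, 100 for BankNifty) from chain."""
--     if not chain or len(chain) < 2:
--         return 50
--     strikes = set()
--     for r in chain:
--         s = r.get('strike', 0)
--         if s:
--             strikes.add(s)
--     # minimum gap over all unordered pairs of distinct strikes (no sorting)
--     best = None
--     rest = list(strikes)
--     while rest:
--         a = rest[0]
--         rest = rest[1:]
--         for c in rest:
--             d = a - c if a > c else c - a
--             if best is None or d < best:
--                 best = d
--     return 50 if best is None else best
-- ===== Notes on version B (the rewrite author's own statement) =====
-- stated objective: alternative
-- what changed: Replaces 'sort the distinct strikes, take adjacent differences, min of the positive ones' by a sort-free pairwise scan: for every unordered pair of distinct strikes keep the smallest absolute gap.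
import Mathlib
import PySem

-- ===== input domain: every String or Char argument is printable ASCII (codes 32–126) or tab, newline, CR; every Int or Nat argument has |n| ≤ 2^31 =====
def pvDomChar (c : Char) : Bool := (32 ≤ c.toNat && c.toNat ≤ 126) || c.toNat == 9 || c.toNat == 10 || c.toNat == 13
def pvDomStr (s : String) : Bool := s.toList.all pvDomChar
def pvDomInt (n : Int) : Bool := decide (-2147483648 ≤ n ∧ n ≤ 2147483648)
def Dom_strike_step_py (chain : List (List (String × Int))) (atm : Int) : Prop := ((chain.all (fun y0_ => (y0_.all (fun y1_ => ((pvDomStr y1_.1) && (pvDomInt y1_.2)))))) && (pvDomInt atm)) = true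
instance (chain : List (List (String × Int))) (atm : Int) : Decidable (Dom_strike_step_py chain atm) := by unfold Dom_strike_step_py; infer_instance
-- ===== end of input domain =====

-- B replaces A's 'sort, adjacent differences, min of positive ones' by a sort-free scan over all
-- unordered pairs of distinct strikes keeping the smallest absolute gap (alternative algorithm).


-- ===== PORT A =====
-- r.get('strike') truthy  ⇔  (get? r "strike").getD 0 ≠ 0  (None and 0 are both falsy)
def pvGetStrike (r : List (String × Int)) : Int :=
  ((PySem.Dict.mk r).get? "strike").getD 0

def strike_step_py (chain : List (List (String × Int))) (atm : Int) : Int :=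
  if chain = [] ∨ chain.length < 2 then 50
  else
    let strikes := PySem.List.sorted
      (PySem.Set.ofList ((chain.filter (fun r => decide (pvGetStrike r ≠ 0))).map pvGetStrike))
      (fun x => x) false
    if strikes.length < 2 then 50
    else
      let diffs := (PySem.List.pyRange 0 ((strikes.length : Int) - 1) 1).map
        (fun i => PySem.List.pyGetD strikes (i + 1) 0 - PySem.List.pyGetD strikes i 0)
      if diffs = [] then 50
      else
        -- min(...) over the positive diffs; the generator is never empty here, so Python never
        -- reaches the ValueError case and the .getD 50 fallback is unreachable
        (PySem.List.min? (diffs.filter (fun d => decide (0 < d))) (fun x => x)).getD 50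

-- ===== PORT B =====
def pvPdiff (a c : Int) : Int := if a > c then a - c else c - a

def pvBest (best : Option Int) (d : Int) : Option Int :=
  match best with
  | none => some d
  | some m => if d < m then some d else some m

-- the 'while rest:' loop of Source B: peel the first element, scan it against the rest
def pvPairLoop : List Int → Option Int → Option Int
  | [], best => best
  | a :: rest, best => pvPairLoop rest (rest.foldl (fun b c => pvBest b (pvPdiff a c)) best)

def strike_step_py_alt (chain : List (List (String × Int))) (atm : Int) : Int :=
  if chain = [] ∨ chain.length < 2 then 50
  else
    let strikes : PySem.Set Int := chain.foldl (fun s r =>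
      let v := (PySem.Dict.mk r).getD "strike" 0
      if v ≠ 0 then PySem.Set.add s v else s) PySem.Set.empty
    match pvPairLoop strikes none with
    | none => 50
    | some m => m

-- ===== PRECONDITION & SPEC =====
def Spec_strike_step_py (chain : List (List (String × Int))) (atm : Int) (out : Int) : Prop := out = strike_step_py_alt chain atm
instance (chain : List (List (String × Int))) (atm : Int) (out : Int) : Decidable (Spec_strike_step_py chain atm out) := by unfold Spec_strike_step_py; infer_instance

-- ===== CLAIM (what is proved, stated in full; the proofs are below) =====
def Claim_equal_strike_step_py : Prop := ∀ (chain : List (List (String × Int))) (atm : Int), Dom_strike_step_py chain atm → Spec_strike_step_py chain atm (strike_step_py chain atm)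

-- ===== LEMMAS AND PROOFS =====

-- adjacent differences of a list (A's 'diffs', structurally)
def pvAdj : List Int → List Int
  | a :: b :: r => (b - a) :: pvAdj (b :: r)
  | _ => []

-- all absolute pairwise differences, in Source B's scan order
def pvPairDiffs : List Int → List Int
  | [] => []
  | a :: rest => rest.map (pvPdiff a) ++ pvPairDiffs rest

theorem pvPdiff_comm (a b : Int) : pvPdiff a b = pvPdiff b a := by
  unfold pvPdiff; split_ifs <;> omega

theorem pvPairLoop_eq (l : List Int) (best : Option Int) :
    pvPairLoop l best = (pvPairDiffs l).foldl pvBest best := by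
  induction l generalizing best with
  | nil => rfl
  | cons a rest ih =>
      simp [pvPairLoop, pvPairDiffs, List.foldl_append, List.foldl_map, ih]

theorem pvFoldl_pvBest_some (l : List Int) (m : Int) :
    l.foldl pvBest (some m) = some (l.foldl min m) := by
  induction l generalizing m with
  | nil => rfl
  | cons d t ih =>
      have h : pvBest (some m) d = some (min m d) := by
        simp only [pvBest]
        split_ifs <;> simp only [Option.some.injEq] <;> omega
      simp only [List.foldl_cons, h, ih]

theorem pvFoldl_pvBest_none (l : List Int) :
    l.foldl pvBest none = PySem.List.min? l (fun y => y) := by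
  cases l with
  | nil => rfl
  | cons x t =>
      rw [PySem.List.min?_id_cons]
      simpa using pvFoldl_pvBest_some t x

theorem pvMem_pairDiffs_iff (l : List Int) (d : Int) :
    d ∈ pvPairDiffs l ↔ ∃ a b, [a, b].Sublist l ∧ d = pvPdiff a b := by
  induction l with
  | nil => simp [pvPairDiffs]
  | cons x rest ih =>
      simp only [pvPairDiffs, List.mem_append, List.mem_map, ih]
      constructor
      · rintro (⟨b, hb, rfl⟩ | ⟨a, b, hs, rfl⟩)
        · exact ⟨x, b, by simpa using List.Sublist.cons₂ x (List.singleton_sublist.mpr hb), rfl⟩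
        · exact ⟨a, b, hs.cons x, rfl⟩
      · rintro ⟨a, b, hs, rfl⟩
        cases hs with
        | cons _ h => exact Or.inr ⟨a, b, h, rfl⟩
        | cons₂ _ h => exact Or.inl ⟨b, by simpa using h, rfl⟩

theorem pvAdj_mem (t : List Int) (d : Int) (h : d ∈ pvAdj t) :
    ∃ a b, [a, b].Sublist t ∧ d = b - a := by
  induction t with
  | nil => simp [pvAdj] at h
  | cons x rest ih =>
      cases rest with
      | nil => simp [pvAdj] at h
      | cons y r =>
          simp only [pvAdj, List.mem_cons] at h
          rcases h with rfl | h
          · exact ⟨x, y, List.Sublist.cons₂ x (by simp), rfl⟩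
          · obtain ⟨a, b, hs, rfl⟩ := ih h
            exact ⟨a, b, hs.cons x, rfl⟩

-- pair of distinct members of a nodup list forms a 2-element sublist in one of the two orders
theorem pvSublist_of_mem (l : List Int) (hnd : l.Nodup) (a b : Int)
    (ha : a ∈ l) (hb : b ∈ l) (hne : a ≠ b) :
    [a, b].Sublist l ∨ [b, a].Sublist l := by
  induction l with
  | nil => simp at ha
  | cons x rest ih =>
      rcases List.mem_cons.mp ha with rfl | ha'
      · have hb' : b ∈ rest := by
          rcases List.mem_cons.mp hb with rfl | h
          · exact absurd rfl hne
          · exact h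
        exact Or.inl (by simpa using List.Sublist.cons₂ a (List.singleton_sublist.mpr hb'))
      · rcases List.mem_cons.mp hb with rfl | hb'
        · exact Or.inr (by simpa using List.Sublist.cons₂ b (List.singleton_sublist.mpr ha'))
        · rcases ih (List.nodup_cons.mp hnd).2 ha' hb' with h | h
          · exact Or.inl (h.cons x)
          · exact Or.inr (h.cons x)

-- crux: any gap between two members of a strictly increasing list dominates some adjacent gap bound
theorem pvChainLB (t : List Int) (hlt : t.Pairwise (· < ·)) (m : Int)
    (hm : ∀ d ∈ pvAdj t, m ≤ d) :
    ∀ a ∈ t, ∀ b ∈ t, a < b → m ≤ b - a := by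
  induction t with
  | nil => intro a ha; simp at ha
  | cons x rest ih =>
      obtain ⟨hx, hrest⟩ := List.pairwise_cons.mp hlt
      intro a ha b hb hab
      rcases List.mem_cons.mp ha with rfl | ha' <;> rcases List.mem_cons.mp hb with rfl | hb'
      · omega
      · -- a is the head, b later
        cases rest with
        | nil => simp at hb'
        | cons y r =>
            have hyx : m ≤ y - a := hm (y - a) (by simp [pvAdj])
            have hyb : y ≤ b := by
              rcases List.mem_cons.mp hb' with rfl | h
              · omega
              · exact le_of_lt ((List.pairwise_cons.mp hrest).1 b h)
            omega
      · have := hx a ha'; omega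
      · -- both in the tail: induction hypothesis
        cases rest with
        | nil => simp at ha'
        | cons y r =>
            have hm' : ∀ d ∈ pvAdj (y :: r), m ≤ d := by
              intro d hd
              exact hm d (by simp [pvAdj]; exact Or.inr hd)
            exact ih hrest hm' a ha' b hb' hab

theorem pvAdj_shift (l : List Int) (x : Int) (n : Nat) :
    PySem.List.pyGetD (x :: l) (((n + 1 : Nat) : Int)) 0 = PySem.List.pyGetD l ((n : Nat) : Int) 0 := by
  rw [PySem.List.pyGetD_natCast, PySem.List.pyGetD_natCast]
  rfl

theorem pvAdj_aux (s : List Int) : ∀ a : Int,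
    (List.range s.length).map (fun k => PySem.List.pyGetD (a :: s) (((k : Nat) : Int) + 1) 0
      - PySem.List.pyGetD (a :: s) ((k : Nat) : Int) 0) = pvAdj (a :: s) := by
  induction s with
  | nil => intro a; rfl
  | cons b r ih =>
      intro a
      rw [List.length_cons, List.range_succ_eq_map, List.map_cons, List.map_map]
      have h0 : PySem.List.pyGetD (a :: b :: r) (((0 : Nat) : Int) + 1) 0
          - PySem.List.pyGetD (a :: b :: r) ((0 : Nat) : Int) 0 = b - a := by
        have e : (((0 : Nat) : Int) + 1) = ((1 : Nat) : Int) := by omega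
        rw [e, PySem.List.pyGetD_natCast, PySem.List.pyGetD_natCast]
        rfl
      simp only [pvAdj]
      rw [List.cons_eq_cons]
      refine ⟨h0, ?_⟩
      rw [← ih b]
      apply List.map_congr_left
      intro k _
      simp only [Function.comp_apply, Nat.succ_eq_add_one]
      have e1 : (((k + 1 : Nat) : Int) + 1) = ((k + 2 : Nat) : Int) := by omega
      rw [e1, show ((k + 2 : Nat) : Int) = (((k + 1) + 1 : Nat) : Int) from by omega,
        pvAdj_shift (b :: r) a (k + 1), pvAdj_shift (b :: r) a k]
      have e2 : (((k : Nat) : Int) + 1) = ((k + 1 : Nat) : Int) := by omega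
      rw [e2, pvAdj_shift r b k]

theorem pvAdj_eq_range (t : List Int) :
    (PySem.List.pyRange 0 ((t.length : Int) - 1) 1).map
      (fun i => PySem.List.pyGetD t (i + 1) 0 - PySem.List.pyGetD t i 0) = pvAdj t := by
  cases t with
  | nil => decide
  | cons a s =>
      have h : ((a :: s).length : Int) - 1 = ((s.length : Nat) : Int) := by simp
      rw [h, PySem.List.pyRange_zero_natCast, List.map_map, ← pvAdj_aux s a]
      apply List.map_congr_left
      intro k _
      rfl

theorem pvStrikes_aux (chain : List (List (String × Int))) (s : PySem.Set Int) :
    chain.foldl (fun s r =>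
        let v := (PySem.Dict.mk r).getD "strike" 0
        if v ≠ 0 then PySem.Set.add s v else s) s
      = ((chain.filter (fun r => decide (pvGetStrike r ≠ 0))).map pvGetStrike).foldl PySem.Set.add s := by
  induction chain generalizing s with
  | nil => rfl
  | cons r c ih =>
      have hv : (PySem.Dict.mk r).getD "strike" 0 = pvGetStrike r := by
        rw [PySem.Dict.getD_eq_get?_getD]; rfl
      by_cases h : pvGetStrike r ≠ 0
      · simp only [List.foldl_cons, hv, if_pos h, List.filter_cons]
        rw [if_pos (show decide (pvGetStrike r ≠ 0) = true from decide_eq_true h)]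
        rw [List.map_cons, List.foldl_cons]
        exact ih _
      · simp only [List.foldl_cons, hv, if_neg h, List.filter_cons]
        rw [if_neg (show ¬ (decide (pvGetStrike r ≠ 0) = true) from by simpa using h)]
        exact ih _

theorem pvStrikes_eq (chain : List (List (String × Int))) :
    chain.foldl (fun s r =>
        let v := (PySem.Dict.mk r).getD "strike" 0
        if v ≠ 0 then PySem.Set.add s v else s) PySem.Set.empty
      = PySem.Set.ofList ((chain.filter (fun r => decide (pvGetStrike r ≠ 0))).map pvGetStrike) := by
  rw [PySem.Set.ofList_eq_foldl]
  exact pvStrikes_aux chain PySem.Set.empty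

-- main bridge: with at least two distinct strikes, min adjacent diff of the sorted list
-- equals min pairwise absolute diff of the unsorted list
theorem pvMain (S : List Int) (hnd : S.Nodup) :
    PySem.List.min? (pvAdj (PySem.List.sorted S (fun x => x) false)) (fun x => x)
      = PySem.List.min? (pvPairDiffs S) (fun x => x) := by
  set t := PySem.List.sorted S (fun x => x) false with ht
  have hperm : t.Perm S := PySem.List.sorted_perm S (fun x => x) false
  have hndt : t.Nodup := hperm.nodup_iff.mpr hnd
  have hle : t.Pairwise (· ≤ ·) := PySem.List.sorted_pairwise S (fun x => x)
  have hlt : t.Pairwise (· < ·) := by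
    have := hle.and hndt
    exact this.imp (fun h => lt_of_le_of_ne h.1 h.2)
  rcases h1 : PySem.List.min? (pvAdj t) (fun x => x) with _ | m1
  · -- adj t empty ⇒ t has ≤ 1 element ⇒ no pairs either
    rw [PySem.List.min?_eq_none_iff] at h1
    symm
    rw [PySem.List.min?_eq_none_iff]
    match ht2 : t, h1 with
    | [], _ =>
        have : S = [] := by simpa [← ht2] using hperm.symm.eq_nil
        simp [this, pvPairDiffs]
    | [a], _ =>
        have : S.length = 1 := by simpa using hperm.symm.length_eq
        match S, this with
        | [x], _ => rfl
  · rcases h2 : PySem.List.min? (pvPairDiffs S) (fun x => x) with _ | m2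
    · -- pairDiffs empty while adj nonempty: impossible
      rw [PySem.List.min?_eq_none_iff] at h2
      have hm1 := PySem.List.min?_mem h1
      obtain ⟨a, b, hs, rfl⟩ := pvAdj_mem t _ hm1
      have hab : a ≠ b := by have := hndt.sublist hs; simp at this; exact this
      have ha : a ∈ S := hperm.mem_iff.mp (hs.mem (by simp))
      have hb : b ∈ S := hperm.mem_iff.mp (hs.mem (by simp))
      rcases pvSublist_of_mem S hnd a b ha hb hab with h | h
      · have : pvPdiff a b ∈ pvPairDiffs S := (pvMem_pairDiffs_iff S _).mpr ⟨a, b, h, rfl⟩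
        rw [h2] at this; simp at this
      · have : pvPdiff b a ∈ pvPairDiffs S := (pvMem_pairDiffs_iff S _).mpr ⟨b, a, h, rfl⟩
        rw [h2] at this; simp at this
    · congr 1
      have hm1mem := PySem.List.min?_mem h1
      have hm1min : ∀ d ∈ pvAdj t, m1 ≤ d := PySem.List.min?_isMin h1
      have hm2mem := PySem.List.min?_mem h2
      have hm2min : ∀ d ∈ pvPairDiffs S, m2 ≤ d := PySem.List.min?_isMin h2
      -- m1 ≤ m2
      obtain ⟨a, b, hs, rfl⟩ := (pvMem_pairDiffs_iff S _).mp hm2mem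
      have hab : a ≠ b := by have := hnd.sublist hs; simp at this; exact this
      have hat : a ∈ t := hperm.mem_iff.mpr (hs.mem (by simp))
      have hbt : b ∈ t := hperm.mem_iff.mpr (hs.mem (by simp))
      have h12 : m1 ≤ pvPdiff a b := by
        rcases lt_or_gt_of_ne hab with h | h
        · have := pvChainLB t hlt m1 hm1min a hat b hbt h
          unfold pvPdiff; split_ifs <;> omega
        · have := pvChainLB t hlt m1 hm1min b hbt a hat h
          unfold pvPdiff; split_ifs <;> omega
      -- m2 ≤ m1
      obtain ⟨a', b', hs', heq'⟩ := pvAdj_mem t _ hm1mem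
      have hab' : a' ≠ b' := by have := hndt.sublist hs'; simp at this; exact this
      have ha' : a' ∈ S := hperm.mem_iff.mp (hs'.mem (by simp))
      have hb' : b' ∈ S := hperm.mem_iff.mp (hs'.mem (by simp))
      have hlt' : a' < b' := by
        have := hlt.sublist hs'; simp at this; exact this
      have hpd : pvPdiff a' b' = m1 := by unfold pvPdiff; split_ifs <;> omega
      have h21 : pvPdiff a b ≤ m1 := by
        rcases pvSublist_of_mem S hnd a' b' ha' hb' hab' with h | h
        · have := hm2min _ ((pvMem_pairDiffs_iff S _).mpr ⟨a', b', h, rfl⟩)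
          omega
        · have := hm2min _ ((pvMem_pairDiffs_iff S _).mpr ⟨b', a', h, rfl⟩)
          rw [pvPdiff_comm b' a'] at this
          omega
      omega

theorem pvPairDiffs_short (S : List Int) (h : S.length ≤ 1) : pvPairDiffs S = [] := by
  cases S with
  | nil => rfl
  | cons x s =>
      cases s with
      | nil => rfl
      | cons y r => simp at h

theorem pvAdj_ne_nil (t : List Int) (h : 1 < t.length) : pvAdj t ≠ [] := by
  cases t with
  | nil => simp at h
  | cons x s =>
      cases s with
      | nil => simp at h
      | cons y r => simp [pvAdj]

-- ===== VERDICT (by name: the statement is the Claim_ definition above) =====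
theorem strike_step_py_spec : Claim_equal_strike_step_py := by
  intro chain atm _
  unfold Spec_strike_step_py strike_step_py strike_step_py_alt
  by_cases hg : chain = [] ∨ chain.length < 2
  · rw [if_pos hg, if_pos hg]
  · rw [if_neg hg, if_neg hg]
    dsimp only
    rw [pvStrikes_eq, pvPairLoop_eq, pvFoldl_pvBest_none]
    set S := PySem.Set.ofList ((chain.filter (fun r => decide (pvGetStrike r ≠ 0))).map pvGetStrike) with hS
    have hnd : S.Nodup := PySem.Set.nodup_ofList _
    set t := PySem.List.sorted S (fun x => x) false with ht
    have hlen : t.length = S.length := PySem.List.length_sorted _ _ _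
    have hperm : t.Perm S := PySem.List.sorted_perm S (fun x => x) false
    have hndt : t.Nodup := hperm.nodup_iff.mpr hnd
    have hle : t.Pairwise (· ≤ ·) := PySem.List.sorted_pairwise S (fun x => x)
    have hlt : t.Pairwise (· < ·) :=
      (hle.and hndt).imp (fun h => lt_of_le_of_ne h.1 h.2)
    by_cases h2 : t.length < 2
    · -- fewer than two distinct strikes: both return 50
      have hS2 : pvPairDiffs S = [] := by
        rw [hlen] at h2
        exact pvPairDiffs_short S (by omega)
      simp only [h2, if_true, hS2]
      rfl
    · simp only [h2, if_false]
      rw [pvAdj_eq_range t]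
      have hpos : ∀ d ∈ pvAdj t, 0 < d := by
        intro d hd
        obtain ⟨a, b, hs, rfl⟩ := pvAdj_mem t d hd
        have : a < b := by have := hlt.sublist hs; simp at this; exact this
        omega
      have hfilter : (pvAdj t).filter (fun d => decide (0 < d)) = pvAdj t :=
        List.filter_eq_self.mpr (fun a ha => by simpa using hpos a ha)
      have hne : pvAdj t ≠ [] := pvAdj_ne_nil t (by omega)
      have hmain := pvMain S hnd
      rw [← ht] at hmain
      rw [if_neg hne, hfilter, hmain]
      cases PySem.List.min? (pvPairDiffs S) (fun x => x) with
      | none => rfl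
      | some m => rfl
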